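-- pv_equiv track=rewrite | github.com/RenzKa/sign-segmentation | utils/utils.py | get_num_signs
-- ===== SOURCE A (Python) =====
-- def get_num_signs(gt):
--     """count number of signs.
--
--     Args:
--         gt: list of framewise labels/ predictions.
--
--     Returns:
--         number of signs
--     """
--     item_old = gt[0]
--     count = 0
--     for ix, item in enumerate(gt):
--         if item_old == 0 and item == 1:
--             count += 1
--         if ix == len(gt)-1 and item != 1:
--             count += 1
--
--         item_old = item
--     return count
-- ===== SOURCE B (Python) =====
-- def get_num_signs(gt):
--     """count number of signs.
--
--     Args:
--         gt: list of framewise labels/ predictions.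
--
--     Returns:
--         number of signs
--     """
--     last = gt[-1]  # raises IndexError on empty input, like A's gt[0]
--     runs = []
--     for v in gt:  # collapse gt into the values of its consecutive runs
--         if not runs or runs[-1] != v:
--             runs.append(v)
--     count = sum(1 for a, b in zip(runs, runs[1:]) if a == 0 and b == 1)
--     return count + (1 if last != 1 else 0)
-- ===== Notes on version B (the rewrite author's own statement) =====
-- stated objective: alternative
-- what changed: B first collapses the label sequence into its consecutive-run values, then counts 0->1 transitions between adjacent runs via zip-pairs plus a final +1 if the last label != 1, instead of A's framewise enumerate loop carrying item_old and an ix==len-1 check.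
import Mathlib
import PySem

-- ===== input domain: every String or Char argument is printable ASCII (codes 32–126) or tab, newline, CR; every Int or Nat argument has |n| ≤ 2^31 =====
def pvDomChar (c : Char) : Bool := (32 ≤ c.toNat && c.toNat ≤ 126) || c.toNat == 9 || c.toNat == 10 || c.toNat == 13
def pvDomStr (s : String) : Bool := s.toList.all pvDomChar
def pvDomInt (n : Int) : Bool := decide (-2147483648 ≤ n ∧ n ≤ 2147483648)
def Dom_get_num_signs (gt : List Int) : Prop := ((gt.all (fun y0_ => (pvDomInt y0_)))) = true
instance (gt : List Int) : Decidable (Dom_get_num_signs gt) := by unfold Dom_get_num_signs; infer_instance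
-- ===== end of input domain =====

-- B collapses the labels into consecutive-run values and counts adjacent 0->1 run
-- transitions (plus 1 if the last label != 1), instead of A's framewise loop.

-- ===== PORT A =====
def get_num_signs (gt : List Int) : Int :=
  match PySem.List.pyGet? gt 0 with
  | none => 0  -- gt[0] raises IndexError: excluded by Pre_
  | some item_old0 =>
    ((PySem.List.enumerate gt 0).foldl
      (fun (s : Int × Int) (p : Int × Int) =>
        let c1 := if s.1 = 0 ∧ p.2 = 1 then s.2 + 1 else s.2
        let c2 := if p.1 = (gt.length : Int) - 1 ∧ p.2 ≠ 1 then c1 + 1 else c1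
        (p.2, c2)) (item_old0, 0)).2

-- ===== PORT B =====
-- 'if not runs or runs[-1] != v: runs.append(v)'
def pvRunsStep (rs : List Int) (v : Int) : List Int :=
  if rs = [] ∨ rs.getLast? ≠ some v then rs ++ [v] else rs

def get_num_signs_alt (gt : List Int) : Int :=
  match PySem.List.pyGet? gt (-1) with
  | none => 0  -- gt[-1] raises IndexError: excluded by Pre_
  | some last =>
    let runs := gt.foldl pvRunsStep []
    ((runs.zip (runs.drop 1)).countP (fun p => p.1 == 0 && p.2 == 1) : Int)
      + (if last ≠ 1 then 1 else 0)

-- ===== PRECONDITION & SPEC =====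
-- Pre_ excludes only the empty list, on which both A (gt[0]) and B (gt[-1]) raise IndexError.
def Pre_get_num_signs (gt : List Int) : Prop := gt ≠ []
instance (gt : List Int) : Decidable (Pre_get_num_signs gt) := by unfold Pre_get_num_signs; infer_instance
def pvWitness_get_num_signs : List Int := [0, 1, 1, 0]

def Spec_get_num_signs (gt : List Int) (out : Int) : Prop := out = get_num_signs_alt gt
instance (gt : List Int) (out : Int) : Decidable (Spec_get_num_signs gt out) := by unfold Spec_get_num_signs; infer_instance

-- ===== CLAIM (what is proved, stated in full; the proofs are below) =====
def Claim_equal_get_num_signs : Prop := ∀ (gt : List Int), Dom_get_num_signs gt → Pre_get_num_signs gt → Spec_get_num_signs gt (get_num_signs gt)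

-- ===== LEMMAS AND PROOFS =====

-- pairwise recursion equivalent to A's loop body ('r = []' ↔ 'ix = len(gt)-1')
def pvCountA (prev : Int) : List Int → Int
  | [] => 0
  | x :: r =>
      (if prev = 0 ∧ x = 1 then 1 else 0) + (if r = [] ∧ x ≠ 1 then 1 else 0) + pvCountA x r

-- number of 0->1 adjacent transitions
def pvEdges : List Int → Int
  | a :: b :: t => (if a = 0 ∧ b = 1 then 1 else 0) + pvEdges (b :: t)
  | _ => 0

-- run values of t after a run of value a
def pvCollapseAfter (a : Int) : List Int → List Int
  | [] => []
  | b :: t => if b = a then pvCollapseAfter a t else b :: pvCollapseAfter b t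

theorem pvFoldA (n : Int) (l : List Int) : ∀ (s prev c : Int), s + (l.length : Int) = n →
    ((PySem.List.enumerate l s).foldl
      (fun (st : Int × Int) (p : Int × Int) =>
        let c1 := if st.1 = 0 ∧ p.2 = 1 then st.2 + 1 else st.2
        let c2 := if p.1 = n - 1 ∧ p.2 ≠ 1 then c1 + 1 else c1
        (p.2, c2)) (prev, c)).2 = c + pvCountA prev l := by
  induction l with
  | nil => intro s prev c h; simp [PySem.List.enumerate_nil, pvCountA]
  | cons x r ih =>
      intro s prev c h
      rw [PySem.List.enumerate_cons, List.foldl_cons]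
      have hlast : (s = n - 1) ↔ (r = []) := by
        constructor
        · intro hs
          have : (r.length : Int) = 0 := by simp at h; omega
          simpa using this
        · intro hr; subst hr; simp at h; omega
      rw [ih (s + 1) x _ (by simp at h ⊢; omega)]
      simp only [pvCountA]
      by_cases h1 : prev = 0 ∧ x = 1 <;> by_cases h2 : s = n - 1 ∧ x ≠ 1 <;>
        simp [h1, h2, hlast.symm] <;> by_cases hr : r = [] <;>
        simp_all <;> ring

theorem pvCountA_eq : ∀ (r : List Int) (x prev : Int),
    pvCountA prev (x :: r) = (if prev = 0 ∧ x = 1 then 1 else 0) + pvEdges (x :: r)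
      + (if (x :: r).getLast? ≠ some 1 then 1 else 0) := by
  intro r
  induction r with
  | nil => intro x prev; simp [pvCountA, pvEdges]
  | cons y r ih =>
      intro x prev
      simp only [pvCountA] at *
      rw [ih y x]
      have : (x :: y :: r).getLast? = (y :: r).getLast? := by simp
      rw [this]
      simp [pvEdges]
      ring

theorem pvFoldRuns : ∀ (l rs : List Int) (a : Int), rs.getLast? = some a →
    l.foldl pvRunsStep rs = rs ++ pvCollapseAfter a l := by
  intro l
  induction l with
  | nil => intro rs a h; simp [pvCollapseAfter]
  | cons b t ih =>
      intro rs a h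
      have hne : rs ≠ [] := by intro hr; simp [hr] at h
      rw [List.foldl_cons]
      by_cases hb : b = a
      · have : pvRunsStep rs b = rs := by
          simp [pvRunsStep, hne, h, hb]
        rw [this, ih rs a h]
        simp [pvCollapseAfter, hb]
      · have hstep : pvRunsStep rs b = rs ++ [b] := by
          unfold pvRunsStep
          rw [if_pos (Or.inr (by simp [h]; exact fun hc => hb hc.symm))]
        rw [hstep, ih (rs ++ [b]) b (by simp)]
        simp [pvCollapseAfter, hb]
theorem pvEdges_collapse : ∀ (t : List Int) (a : Int),
    pvEdges (a :: pvCollapseAfter a t) = pvEdges (a :: t) := by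
  intro t
  induction t with
  | nil => intro a; simp [pvCollapseAfter]
  | cons b t ih =>
      intro a
      by_cases hb : b = a
      · subst hb
        rw [show pvCollapseAfter b (b :: t) = pvCollapseAfter b t from by simp [pvCollapseAfter]]
        rw [ih b]
        simp only [pvEdges]
        have : ¬ (b = 0 ∧ b = 1) := by omega
        simp [this]
      · simp only [pvCollapseAfter, if_neg hb]
        simp only [pvEdges]
        rw [ih b]

theorem pvZipCount : ∀ (l : List Int),
    ((l.zip (l.drop 1)).countP (fun p => p.1 == 0 && p.2 == 1) : Int) = pvEdges l := by
  intro l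
  induction l with
  | nil => simp [pvEdges]
  | cons a t ih =>
      cases t with
      | nil => simp [pvEdges]
      | cons b t' =>
          simp only [List.drop_one, List.tail_cons, List.zip_cons_cons, List.countP_cons]
          simp only [List.drop_one] at ih
          simp only [pvEdges]
          rw [← ih]
          by_cases h : a = 0 ∧ b = 1
          · simp [h.1, h.2]; ring
          · have : (a == 0 && b == 1) = false := by
              simp only [Bool.and_eq_false_iff, beq_eq_false_iff_ne]
              by_cases ha : a = 0
              · right; intro hb; exact h ⟨ha, hb⟩
              · left; exact ha
            simp [this, h]

-- ===== VERDICT (by name: the statement is the Claim_ definition above) =====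
theorem get_num_signs_spec : Claim_equal_get_num_signs := by
  intro gt _ hpre
  unfold Spec_get_num_signs get_num_signs get_num_signs_alt
  obtain ⟨a, t, rfl⟩ : ∃ a t, gt = a :: t := by
    cases gt with
    | nil => exact absurd rfl hpre
    | cons a t => exact ⟨a, t, rfl⟩
  rw [PySem.List.pyGet?_zero_cons, PySem.List.pyGet?_neg_one]
  obtain ⟨L, hL⟩ : ∃ L, (a :: t).getLast? = some L :=
    Option.isSome_iff_exists.mp (by simp)
  rw [hL]
  simp only
  rw [pvFoldA ((a :: t).length : Int) (a :: t) 0 a 0 (by simp)]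
  rw [pvCountA_eq t a a, hL]
  have hruns : (a :: t).foldl pvRunsStep [] = a :: pvCollapseAfter a t := by
    rw [List.foldl_cons]
    have h1 : pvRunsStep [] a = [a] := by simp [pvRunsStep]
    rw [h1, pvFoldRuns t [a] a (by simp)]
    simp
  rw [hruns, pvZipCount (a :: pvCollapseAfter a t), pvEdges_collapse t a]
  have he : ¬ (a = 0 ∧ a = 1) := by omega
  have hb : (some L ≠ some (1 : Int)) ↔ (L ≠ 1) := by simp
  simp only [he, if_false, hb]
  ring
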